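-- pv_equiv track=rewrite | github.com/Behnoushin/Algorithm | CountWordsWithPrimeLength.py | countWordsWithPrimeLength
-- ===== SOURCE A (Python) =====
-- def countWordsWithPrimeLength(s: str) -> int:
--
--     def is_prime(num: int) -> bool:
--         if num <= 1:
--             return False
--         if num == 2:
--             return True
--         if num % 2 == 0:
--             return False
--         i = 3
--         while i * i <= num:
--             if num % i == 0:
--                 return False
--             i += 2
--         return True
--
--     words = s.split()
--     count = 0
--     for word in words:
--         if is_prime(len(word)):
--             count += 1
--     return count
-- ===== SOURCE B (Python) =====
-- def countWordsWithPrimeLength(s: str) -> int: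
--     lengths = [len(w) for w in s.split()]
--     if not lengths:
--         return 0
--     m = max(lengths)
--     composite = {q for p in range(2, m + 1) for q in range(2 * p, m + 1, p)}
--     count = 0
--     for n in lengths:
--         if n >= 2 and n not in composite:
--             count += 1
--     return count
-- ===== Notes on version B (the rewrite author's own statement) =====
-- stated objective: alternative
-- what changed: B replaces A's per-word trial-division primality test with a sieve: it builds one set of all composite numbers up to the maximum word length (multiples p*q for p in 2..m) and counts word lengths by a single set lookup.
import Mathlib
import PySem

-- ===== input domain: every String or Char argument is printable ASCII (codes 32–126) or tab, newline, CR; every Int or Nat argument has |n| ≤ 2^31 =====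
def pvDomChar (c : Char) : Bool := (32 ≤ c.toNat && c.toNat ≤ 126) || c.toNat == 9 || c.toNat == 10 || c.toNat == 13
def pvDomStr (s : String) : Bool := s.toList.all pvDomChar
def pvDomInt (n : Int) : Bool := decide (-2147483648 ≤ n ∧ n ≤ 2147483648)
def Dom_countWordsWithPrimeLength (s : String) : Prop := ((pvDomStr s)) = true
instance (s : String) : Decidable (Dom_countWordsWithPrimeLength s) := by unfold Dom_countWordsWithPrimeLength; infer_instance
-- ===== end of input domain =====

-- B replaces A's per-word trial-division primality test by one sieve-style set of
-- composite numbers up to the maximum word length, then counts by set lookup (alternative algorithm).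

-- ===== PORT A =====
-- the `while i * i <= num: … i += 2` loop of A's inner is_prime
def pvIsPrimeLoop (num i : Int) : Bool :=
  if i * i ≤ num then
    if PySem.Int.mod num i == 0 then false
    else pvIsPrimeLoop num (i + 2)
  else true
termination_by (num + 2 - i).toNat
decreasing_by
  have := mul_self_nonneg i
  have hle : i ≤ num + 1 := by nlinarith
  omega

def pvIsPrime (num : Int) : Bool :=
  if num ≤ 1 then false
  else if num == 2 then true
  else if PySem.Int.mod num 2 == 0 then false
  else pvIsPrimeLoop num 3

def countWordsWithPrimeLength (s : String) : Int :=
  let words := PySem.Str.split₀ s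
  words.foldl (fun count word => if pvIsPrime (PySem.Str.len word) then count + 1 else count) 0

-- ===== PORT B =====
def countWordsWithPrimeLength_alt (s : String) : Int :=
  let lengths := (PySem.Str.split₀ s).map (fun w => PySem.Str.len w)
  if lengths = [] then 0
  else
    match PySem.List.max? lengths (fun n => n) with
    | none => 0   -- unreachable: lengths ≠ []
    | some m =>
      let composite : PySem.Set Int :=
        PySem.Set.ofList ((PySem.List.pyRange 2 (m + 1) 1).flatMap
          (fun p => PySem.List.pyRange (2 * p) (m + 1) p))
      lengths.foldl (fun count n =>
        if 2 ≤ n ∧ composite.contains n = false then count + 1 else count) 0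

-- ===== PRECONDITION & SPEC =====
def Spec_countWordsWithPrimeLength (s : String) (out : Int) : Prop := out = countWordsWithPrimeLength_alt s
instance (s : String) (out : Int) : Decidable (Spec_countWordsWithPrimeLength s out) := by unfold Spec_countWordsWithPrimeLength; infer_instance

-- ===== CLAIM (what is proved, stated in full; the proofs are below) =====
def Claim_equal_countWordsWithPrimeLength : Prop := ∀ (s : String), Dom_countWordsWithPrimeLength s → Spec_countWordsWithPrimeLength s (countWordsWithPrimeLength s)

-- ===== LEMMAS AND PROOFS =====

-- the trial loop from an odd start i accepts exactly when no j ≥ i with j*j ≤ num divides num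
theorem pvIsPrimeLoop_iff (num : Int) (hodd : ¬ (2:Int) ∣ num) (i : Int)
    (hi : 3 ≤ i) (hio : i % 2 = 1) :
    pvIsPrimeLoop num i = true ↔ ∀ j : Int, i ≤ j → j * j ≤ num → ¬ j ∣ num := by
  rw [pvIsPrimeLoop]
  by_cases h1 : i * i ≤ num
  · simp only [h1, if_true]
    by_cases h2 : (i:Int) ∣ num
    · have hm : PySem.Int.mod num i = 0 := (PySem.Int.mod_eq_zero_iff_dvd num i).2 h2
      simp only [hm, beq_self_eq_true, if_true]
      constructor
      · intro h; cases h
      · intro h; exact absurd h2 (h i le_rfl h1)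
    · have hm : ¬ (PySem.Int.mod num i == 0) = true := by
        simp only [beq_iff_eq, PySem.Int.mod_eq_zero_iff_dvd]; exact h2
      simp only [hm, Bool.false_eq_true, if_false]
      rw [pvIsPrimeLoop_iff num hodd (i + 2) (by omega) (by omega)]
      constructor
      · intro h j hj hjj hdvd
        by_cases hge : i + 2 ≤ j
        · exact h j hge hjj hdvd
        · have : j = i ∨ j = i + 1 := by omega
          rcases this with rfl | rfl
          · exact h2 hdvd
          · exact hodd (dvd_trans (by omega) hdvd)
      · intro h j hj hjj; exact h j (by omega) hjj
  · simp only [h1, if_false]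
    constructor
    · intro _ j hj hjj hdvd
      have : i * i ≤ j * j := by nlinarith
      omega
    · intro _; trivial
termination_by (num + 2 - i).toNat
decreasing_by
  have := mul_self_nonneg i
  have hle : i ≤ num + 1 := by nlinarith
  omega

-- A's is_prime computes Nat primality on casts of naturals
theorem pvIsPrime_eq (k : Nat) : pvIsPrime (k : Int) = decide (Nat.Prime k) := by
  unfold pvIsPrime
  by_cases hk1 : k ≤ 1
  · have h1 : (k:Int) ≤ 1 := by exact_mod_cast hk1
    have : ¬ Nat.Prime k := by intro h; have := h.two_le; omega
    simp [h1, this]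
  · by_cases hk2 : k = 2
    · subst hk2; decide
    · have h2 : ¬ ((k:Int) ≤ 1) := by omega
      have h2' : ¬ ((k:Int) == 2) = true := by
        simp only [beq_iff_eq]; exact_mod_cast hk2
      simp only [h2, h2', Bool.false_eq_true, if_false]
      by_cases hev : 2 ∣ k
      · have hevI : (2:Int) ∣ (k:Int) := by exact_mod_cast hev
        have hm : PySem.Int.mod (k:Int) 2 = 0 := (PySem.Int.mod_eq_zero_iff_dvd _ 2).2 hevI
        have hnp : ¬ Nat.Prime k := by
          intro h
          rcases (Nat.Prime.eq_one_or_self_of_dvd h 2 hev) with h' | h' <;> omega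
        simp only [hm, beq_self_eq_true, if_true]
        simp [hnp]
      · have hoddInt : ¬ (2:Int) ∣ (k:Int) := fun h => hev (by exact_mod_cast h)
        have hm : ¬ (PySem.Int.mod (k:Int) 2 == 0) = true := by
          simp only [beq_iff_eq, PySem.Int.mod_eq_zero_iff_dvd]; exact hoddInt
        simp only [hm, Bool.false_eq_true, if_false]
        by_cases hp : Nat.Prime k
        · simp only [hp, decide_true]
          rw [pvIsPrimeLoop_iff _ hoddInt 3 le_rfl (by decide)]
          intro j hj hjj hdvd
          have hjk : (j.toNat : Int) = j := Int.toNat_of_nonneg (by omega)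
          have hdvdN : j.toNat ∣ k := by
            have : ((j.toNat : Int)) ∣ (k:Int) := by rw [hjk]; exact hdvd
            exact_mod_cast this
          rcases hp.eq_one_or_self_of_dvd _ hdvdN with h' | h'
          · omega
          · have hjk' : j = (k:Int) := by omega
            subst hjk'
            nlinarith
        · simp only [hp, decide_false]
          rw [Bool.eq_false_iff]
          intro habs
          rw [pvIsPrimeLoop_iff _ hoddInt 3 le_rfl (by decide)] at habs
          have hk0 : 0 < k := by omega
          have hmf := Nat.minFac_dvd k
          have hmfp := Nat.minFac_prime (n := k) (by omega)
          have hmfsq := Nat.minFac_sq_le_self hk0 hp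
          have hmf2 : 2 ≤ k.minFac := hmfp.two_le
          have hmfne2 : k.minFac ≠ 2 := by
            intro h; exact hev (h ▸ hmf)
          have hmf3 : 3 ≤ k.minFac := by omega
          have hsq : k.minFac * k.minFac ≤ k := by rw [← pow_two]; exact hmfsq
          exact habs (k.minFac : Int) (by exact_mod_cast hmf3)
            (by exact_mod_cast hsq) (by exact_mod_cast hmf)

-- membership in B's composite set, for 2 ≤ n ≤ m
theorem pvComposite_mem (m n : Int) (hnm : n ≤ m) :
    (PySem.Set.ofList ((PySem.List.pyRange 2 (m + 1) 1).flatMap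
        (fun p => PySem.List.pyRange (2 * p) (m + 1) p))).contains n = true
      ↔ ∃ p : Int, 2 ≤ p ∧ p ∣ n ∧ 2 * p ≤ n := by
  rw [PySem.Set.contains_iff, PySem.Set.mem_ofList, List.mem_flatMap]
  constructor
  · rintro ⟨p, hp, hn⟩
    rw [PySem.List.mem_pyRange_one] at hp
    rw [PySem.List.mem_pyRange_iff_of_pos (by omega)] at hn
    obtain ⟨hn1, hn2, hn3⟩ := hn
    refine ⟨p, by omega, ?_, hn1⟩
    have := dvd_add hn3 (dvd_mul_left p 2)
    simpa using this
  · rintro ⟨p, hp2, hpd, hp2n⟩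
    refine ⟨p, ?_, ?_⟩
    · rw [PySem.List.mem_pyRange_one]; omega
    · rw [PySem.List.mem_pyRange_iff_of_pos (by omega)]
      exact ⟨hp2n, by omega, Dvd.dvd.sub hpd (dvd_mul_left p 2)⟩

-- an Int divisor witness below n/2 is exactly Nat non-primality (for casts of k ≥ 2)
theorem pvCompositeWitness_iff (k : Nat) (hk : 2 ≤ k) :
    (∃ p : Int, 2 ≤ p ∧ p ∣ (k:Int) ∧ 2 * p ≤ (k:Int)) ↔ ¬ Nat.Prime k := by
  constructor
  · rintro ⟨p, hp2, hpd, hp2n⟩ hprime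
    have hpk : (p.toNat : Int) = p := Int.toNat_of_nonneg (by omega)
    have hdvdN : p.toNat ∣ k := by
      have : ((p.toNat : Int)) ∣ (k:Int) := by rw [hpk]; exact hpd
      exact_mod_cast this
    rcases hprime.eq_one_or_self_of_dvd _ hdvdN with h' | h' <;> omega
  · intro hp
    have hmf := Nat.minFac_dvd k
    have hmfp := Nat.minFac_prime (n := k) (by omega)
    have hmf2 : 2 ≤ k.minFac := hmfp.two_le
    obtain ⟨q, hq⟩ := hmf
    have hq2 : 2 ≤ q := by
      by_contra hq1
      have : q = 0 ∨ q = 1 := by omega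
      rcases this with rfl | rfl
      · omega
      · have hek : k.minFac = k := by omega
        exact hp (hek ▸ hmfp)
    refine ⟨(k.minFac : Int), by exact_mod_cast hmf2, ⟨(q:Int), by exact_mod_cast hq⟩, ?_⟩
    have : 2 * k.minFac ≤ k := by
      calc 2 * k.minFac ≤ k.minFac * q := by nlinarith
        _ = k := hq.symm
    exact_mod_cast this

-- ===== VERDICT (by name: the statement is the Claim_ definition above) =====
theorem countWordsWithPrimeLength_spec : Claim_equal_countWordsWithPrimeLength := by
  intro s _
  unfold Spec_countWordsWithPrimeLength countWordsWithPrimeLength countWordsWithPrimeLength_alt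
  by_cases hnil : PySem.Str.split₀ s = []
  · simp [hnil]
  · have hlennil : (PySem.Str.split₀ s).map (fun w => PySem.Str.len w) ≠ [] := by
      simpa using hnil
    simp only [hlennil, if_false]
    rcases hmax : PySem.List.max? ((PySem.Str.split₀ s).map (fun w => PySem.Str.len w)) (fun n => n)
      with _ | m
    · exact absurd ((PySem.List.max?_eq_none_iff _ _).1 hmax) hlennil
    · have hmaxle := PySem.List.max?_isMax hmax
      dsimp only
      rw [PySem.List.foldl_ite_add_one (p := fun w => pvIsPrime (PySem.Str.len w) = true),
        PySem.List.foldl_ite_add_one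
          (p := fun n => 2 ≤ n ∧ (PySem.Set.ofList ((PySem.List.pyRange 2 (m + 1) 1).flatMap
            (fun p => PySem.List.pyRange (2 * p) (m + 1) p))).contains n = false),
        List.countP_map]
      congr 1
      congr 1
      apply List.countP_congr
      intro w hw
      have hmem : PySem.Str.len w ∈ (PySem.Str.split₀ s).map (fun w => PySem.Str.len w) :=
        List.mem_map_of_mem hw
      have hnm : PySem.Str.len w ≤ m := hmaxle _ hmem
      have hlen : PySem.Str.len w = (w.toList.length : Int) := by
        simp [PySem.Str.len_eq]
      set k := w.toList.length with hk
      simp only [Function.comp, decide_eq_true_eq, hlen]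
      rw [pvIsPrime_eq k]
      by_cases hk2 : 2 ≤ k
      · have h2I : (2:Int) ≤ (k:Int) := by exact_mod_cast hk2
        rw [hlen] at hnm
        by_cases hp : Nat.Prime k
        · have hcomp : (PySem.Set.ofList ((PySem.List.pyRange 2 (m + 1) 1).flatMap
              (fun p => PySem.List.pyRange (2 * p) (m + 1) p))).contains (k:Int) = false := by
            rw [Bool.eq_false_iff]
            intro hc
            exact ((pvCompositeWitness_iff k hk2).1
              ((pvComposite_mem m (k:Int) hnm).1 hc)) hp
          simp only [hp, decide_true, true_iff]
          exact ⟨h2I, hcomp⟩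
        · have hcomp := (pvComposite_mem m (k:Int) hnm).2
            ((pvCompositeWitness_iff k hk2).2 hp)
          simp only [hp, decide_false, Bool.false_eq_true, false_iff]
          rintro ⟨-, hc⟩
          rw [hcomp] at hc
          cases hc
      · have hnp : ¬ Nat.Prime k := fun h => hk2 h.two_le
        have : ¬ ((2:Int) ≤ (k:Int)) := by exact_mod_cast hk2
        simp [hnp, this]
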